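-- pv_equiv track=rewrite | github.com/johanos1/FedGT | main_threaded.py | allocate_clients_to_threads
-- ===== SOURCE A (Python) =====
-- from collections import defaultdict
--
-- def allocate_clients_to_threads(n_rounds, n_threads, n_clients):
--     mapping_dict = defaultdict(list)
--     for round in range(n_rounds):
--
--         num_clients = n_clients
--         client_list = list(range(num_clients))
--         if num_clients > 0:
--             idxs = [[] for i in range(n_threads)]
--             remaining_clients = num_clients
--             thread_idx = 0
--             client_idx = 0
--             while remaining_clients > 0:
--                 idxs[thread_idx].extend([client_idx])
--
--                 remaining_clients -= 1
--                 thread_idx = (thread_idx + 1) % n_threads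
--                 client_idx += 1
--             for c, l in enumerate(idxs):
--                 mapping_dict[c].append(l)
--     return mapping_dict
-- ===== SOURCE B (Python) =====
-- from collections import defaultdict
--
-- def allocate_clients_to_threads(n_rounds, n_threads, n_clients):
--     # Compute the round-robin allocation once (closed-form stride ranges) and replicate across rounds.
--     mapping_dict = defaultdict(list)
--     if n_rounds <= 0 or n_clients <= 0:
--         return mapping_dict
--     for t in range(n_threads):
--         mapping_dict[t] = [list(range(t, n_clients, n_threads))] * n_rounds
--     return mapping_dict
-- ===== Notes on version B (the rewrite author's own statement) =====
-- stated objective: faster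
-- what changed: B computes the round-robin bucket of each thread once as a closed-form stride range(t, n_clients, n_threads) and replicates it n_rounds times, instead of A's per-round client-by-client while loop with a modulo-stepped thread pointer.
import Mathlib
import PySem

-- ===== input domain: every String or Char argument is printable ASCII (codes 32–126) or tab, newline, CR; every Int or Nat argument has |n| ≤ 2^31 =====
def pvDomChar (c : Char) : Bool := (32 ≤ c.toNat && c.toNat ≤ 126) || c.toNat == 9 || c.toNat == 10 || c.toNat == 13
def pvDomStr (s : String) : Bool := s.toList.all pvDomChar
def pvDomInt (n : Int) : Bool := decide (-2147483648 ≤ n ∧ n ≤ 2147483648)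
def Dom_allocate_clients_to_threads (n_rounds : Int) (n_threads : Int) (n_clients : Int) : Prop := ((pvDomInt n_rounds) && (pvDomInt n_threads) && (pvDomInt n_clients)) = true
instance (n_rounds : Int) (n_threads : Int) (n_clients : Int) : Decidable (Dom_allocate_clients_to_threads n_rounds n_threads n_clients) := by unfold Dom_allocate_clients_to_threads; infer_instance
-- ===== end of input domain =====

-- B replaces A's per-round client-by-client while loop by computing each thread's
-- round-robin bucket once as a stride range and replicating it across rounds (objective: faster).

-- ===== PORT A =====
-- the inner `while remaining_clients > 0` loop of A; fuel = remaining_clients.toNat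
def pyAWhile (idxs : List (List Int)) (remaining thread_idx client_idx n_threads : Int) : Nat → List (List Int)
  | 0 => idxs
  | fuel + 1 =>
    if remaining > 0 then
      pyAWhile (idxs.modify thread_idx.toNat (fun l => l ++ [client_idx]))
        (remaining - 1) (PySem.Int.mod (thread_idx + 1) n_threads) (client_idx + 1) n_threads fuel
    else idxs

def allocate_clients_to_threads (n_rounds : Int) (n_threads : Int) (n_clients : Int) : List (Int × List (List Int)) :=
  ((PySem.List.pyRange 0 n_rounds 1).foldl (fun mapping_dict _round =>
    let num_clients := n_clients
    let _client_list := PySem.List.pyRange 0 num_clients 1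
    if num_clients > 0 then
      let idxs := (PySem.List.pyRange 0 n_threads 1).map (fun _ => ([] : List Int))
      let idxs := pyAWhile idxs num_clients 0 0 n_threads num_clients.toNat
      (PySem.List.enumerate idxs).foldl (fun d p => d.modify p.1 [] (fun v => v ++ [p.2])) mapping_dict
    else mapping_dict) PySem.Dict.empty).items

-- ===== PORT B =====
def allocate_clients_to_threads_alt (n_rounds : Int) (n_threads : Int) (n_clients : Int) : List (Int × List (List Int)) :=
  let mapping_dict : PySem.Dict Int (List (List Int)) := PySem.Dict.empty
  if n_rounds ≤ 0 ∨ n_clients ≤ 0 then mapping_dict.items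
  else ((PySem.List.pyRange 0 n_threads 1).foldl
    (fun d t => d.insert t (List.replicate n_rounds.toNat (PySem.List.pyRange t n_clients n_threads)))
    mapping_dict).items

-- ===== PRECONDITION & SPEC =====
-- Pre_ excludes only the inputs where A raises (ZeroDivisionError/IndexError): rounds and clients
-- both positive but n_threads ≤ 0.
def Pre_allocate_clients_to_threads (n_rounds : Int) (n_threads : Int) (n_clients : Int) : Prop :=
  n_rounds ≤ 0 ∨ n_clients ≤ 0 ∨ 1 ≤ n_threads
instance (n_rounds : Int) (n_threads : Int) (n_clients : Int) : Decidable (Pre_allocate_clients_to_threads n_rounds n_threads n_clients) := by unfold Pre_allocate_clients_to_threads; infer_instance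

def pvWitness_allocate_clients_to_threads : Int × Int × Int := (2, 3, 7)

def Spec_allocate_clients_to_threads (n_rounds : Int) (n_threads : Int) (n_clients : Int) (out : List (Int × List (List Int))) : Prop := out = allocate_clients_to_threads_alt n_rounds n_threads n_clients
instance (n_rounds : Int) (n_threads : Int) (n_clients : Int) (out : List (Int × List (List Int))) : Decidable (Spec_allocate_clients_to_threads n_rounds n_threads n_clients out) := by unfold Spec_allocate_clients_to_threads; infer_instance

-- ===== CLAIM (what is proved, stated in full; the proofs are below) =====
def Claim_equal_allocate_clients_to_threads : Prop := ∀ (n_rounds : Int) (n_threads : Int) (n_clients : Int), Dom_allocate_clients_to_threads n_rounds n_threads n_clients → Pre_allocate_clients_to_threads n_rounds n_threads n_clients → Spec_allocate_clients_to_threads n_rounds n_threads n_clients (allocate_clients_to_threads n_rounds n_threads n_clients)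


-- ===== LEMMAS AND PROOFS =====

-- pyRange with a positive step: empty / cons views
lemma pyRange_nil_of_pos {a b s : Int} (hs : 0 < s) (h : b ≤ a) : PySem.List.pyRange a b s = [] := by
  rw [PySem.List.pyRange_of_pos a b hs, if_neg (by omega)]
  simp

lemma pyRange_cons_of_pos {a b s : Int} (hs : 0 < s) (h : a < b) :
    PySem.List.pyRange a b s = a :: PySem.List.pyRange (a + s) b s := by
  rw [PySem.List.pyRange_of_pos a b hs, PySem.List.pyRange_of_pos (a + s) b hs, if_pos h]
  have key : (b - a + s - 1) / s = (b - (a + s) + s - 1) / s + 1 := by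
    rw [show b - a + s - 1 = (b - (a + s) + s - 1) + 1 * s by ring,
      Int.add_mul_ediv_right _ _ (by omega : s ≠ 0)]
  by_cases h2 : a + s < b
  · rw [if_pos h2, key]
    have hnn : 0 ≤ (b - (a + s) + s - 1) / s := Int.ediv_nonneg (by omega) (by omega)
    rw [show ((b - (a + s) + s - 1) / s + 1).toNat = ((b - (a + s) + s - 1) / s).toNat + 1 by omega,
      List.range_succ_eq_map]
    simp only [List.map_cons, List.map_map, Nat.cast_zero, mul_zero, add_zero]
    congr 1
    apply List.map_congr_left
    intro i _
    simp only [Function.comp, Nat.succ_eq_add_one]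
    push_cast
    ring
  · rw [if_neg h2, key, Int.ediv_eq_zero_of_lt (by omega) (by omega)]
    simp

-- modular arithmetic of the round-robin thread pointer
lemma emod_step (n j t : Int) (hn : 1 ≤ n) (hj0 : 0 ≤ j) (hj1 : j < n) (ht0 : 0 ≤ t)
    (ht1 : t < n) (hne : t ≠ j) :
    (t - (j + 1) % n) % n = (t - j) % n - 1 := by
  have hm : (t - j) % n = if j ≤ t then t - j else t - j + n := by
    split
    · exact Int.emod_eq_of_lt (by omega) (by omega)
    · have h1 : (t - j) % n = (t - j + n) % n := by
        conv_lhs => rw [show t - j = (t - j + n) + (-1) * n by ring]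
        rw [Int.add_mul_emod_self_right]
      rw [h1, Int.emod_eq_of_lt (by omega) (by omega)]
  have hj1' : (j + 1) % n = if j + 1 = n then 0 else j + 1 := by
    split
    · next h => rw [h, Int.emod_self]
    · exact Int.emod_eq_of_lt (by omega) (by omega)
  rw [hj1']
  split_ifs with h
  · rw [sub_zero, Int.emod_eq_of_lt ht0 ht1, hm, if_neg (by omega)]
    omega
  · by_cases hlt : j < t
    · rw [show t - (j + 1) = t - j - 1 by ring, Int.emod_eq_of_lt (by omega) (by omega), hm,
        if_pos (by omega)]
    · rw [show t - (j + 1) = (t - j - 1 + n) + (-1) * n by ring, Int.add_mul_emod_self_right,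
        Int.emod_eq_of_lt (by omega) (by omega), hm, if_neg (by omega)]
      ring

lemma emod_step_self (n j : Int) (hn : 1 ≤ n) (hj0 : 0 ≤ j) (hj1 : j < n) :
    (j - (j + 1) % n) % n = n - 1 := by
  have hj1' : (j + 1) % n = if j + 1 = n then 0 else j + 1 := by
    split
    · next h => rw [h, Int.emod_self]
    · exact Int.emod_eq_of_lt (by omega) (by omega)
  rw [hj1']
  split_ifs with h
  · rw [sub_zero, Int.emod_eq_of_lt hj0 hj1]
    omega
  · rw [show j - (j + 1) = (n - 1) + (-1) * n by ring, Int.add_mul_emod_self_right]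
    exact Int.emod_eq_of_lt (by omega) (by omega)

-- characterisation of A's while loop: thread t's bucket is the stride range starting at its offset
lemma pyAWhile_spec (n : Int) (hn : 1 ≤ n) :
    ∀ (fuel : Nat) (idxs : List (List Int)) (j c : Int), idxs.length = n.toNat → 0 ≤ j → j < n →
    pyAWhile idxs (fuel : Int) j c n fuel
      = idxs.mapIdx (fun t l =>
          l ++ PySem.List.pyRange (c + PySem.Int.mod ((t : Int) - j) n) (c + (fuel : Int)) n) := by
  intro fuel
  induction fuel with
  | zero =>
    intro idxs j c hlen hj0 hj1
    have h0 : pyAWhile idxs ((0 : Nat) : Int) j c n 0 = idxs := rfl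
    rw [h0]
    refine (List.ext_getElem (by simp) ?_).symm
    intro i h1 h2
    simp only [List.getElem_mapIdx]
    rw [pyRange_nil_of_pos (by omega)
      (by have := PySem.Int.mod_nonneg ((i : Int) - j) (show (0:Int) < n by omega); omega)]
    simp
  | succ fuel ih =>
    intro idxs j c hlen hj0 hj1
    have hmod : ∀ a : Int, PySem.Int.mod a n = a % n :=
      fun a => PySem.Int.mod_eq_emod_of_pos (by omega)
    show (if ((fuel + 1 : Nat) : Int) > 0 then _ else _) = _
    rw [if_pos (by positivity)]
    rw [show ((fuel + 1 : Nat) : Int) - 1 = (fuel : Int) by push_cast; ring]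
    rw [ih _ _ _ (by simp [hlen]) (PySem.Int.mod_nonneg _ (by omega)) (PySem.Int.mod_lt _ (by omega))]
    apply List.ext_getElem (by simp)
    intro t h1 h2
    have ht1 : t < idxs.length := by simpa using h2
    have htn : (t : Int) < n := by
      have := ht1; rw [hlen] at this; omega
    simp only [List.getElem_mapIdx, List.getElem_modify]
    by_cases hcase : j.toNat = t
    · rw [if_pos hcase]
      have hjt : (t : Int) = j := by omega
      simp only [hmod]
      rw [hjt, emod_step_self n j hn hj0 hj1, sub_self, Int.zero_emod]
      rw [pyRange_cons_of_pos (show (0:Int) < n by omega)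
        (show c + 0 < c + ((fuel + 1 : Nat) : Int) by push_cast; omega)]
      simp only [List.append_assoc, List.singleton_append]
      rw [show c + 1 + (n - 1) = c + 0 + n by ring]
      push_cast
      ring_nf
    · rw [if_neg hcase]
      have hne : (t : Int) ≠ j := by omega
      simp only [hmod]
      rw [emod_step n j (t : Int) hn hj0 hj1 (by positivity) htn hne]
      push_cast
      ring_nf

-- enumerate: keys, lower bound, filtering one index
lemma enum_map_fst {α : Type} : ∀ (L : List α) (s : Int),
    (PySem.List.enumerate L s).map Prod.fst = (List.range L.length).map (fun i : Nat => s + (i : Int)) := by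
  intro L
  induction L with
  | nil => intro s; simp [PySem.List.enumerate]
  | cons x L ih =>
    intro s
    simp only [PySem.List.enumerate, List.map_cons, List.length_cons, List.range_succ_eq_map,
      List.map_map, ih (s + 1)]
    congr 1
    · simp
    · apply List.map_congr_left
      intro i _
      simp only [Function.comp, Nat.succ_eq_add_one]
      push_cast
      ring

lemma enum_fst_lb {α : Type} : ∀ (L : List α) (s : Int) (p : Int × α),
    p ∈ PySem.List.enumerate L s → s ≤ p.1 := by
  intro L
  induction L with
  | nil => intro s p hp; simp [PySem.List.enumerate] at hp
  | cons x L ih =>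
    intro s p hp
    simp only [PySem.List.enumerate, List.mem_cons] at hp
    rcases hp with h | h
    · simp [h]
    · have := ih (s + 1) p h; omega

lemma enum_filter_eq {α : Type} : ∀ (L : List α) (s : Int) (t : Nat) (ht : t < L.length),
    ((PySem.List.enumerate L s).filter (fun p => p.1 == s + (t : Int))).map Prod.snd = [L[t]] := by
  intro L
  induction L with
  | nil => intro s t ht; simp at ht
  | cons x L ih =>
    intro s t ht
    cases t with
    | zero =>
      have hrest : List.filter (fun p => p.1 == s) (PySem.List.enumerate L (s + 1)) = [] := by
        rw [List.filter_eq_nil_iff]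
        intro p hp
        have := enum_fst_lb L (s + 1) p hp
        simp only [beq_iff_eq]
        omega
      simp [PySem.List.enumerate, List.filter_cons, hrest]
    | succ t =>
      simp only [PySem.List.enumerate, List.filter_cons]
      rw [if_neg (by simp; omega)]
      have := ih (s + 1) t (by simpa using ht)
      rw [show s + ((t + 1 : Nat) : Int) = (s + 1) + (t : Int) by push_cast; ring]
      simpa using this

-- one round of A (the enumerate/defaultdict-append loop)
def pvRound (L : List (List Int)) (d : PySem.Dict Int (List (List Int))) :
    PySem.Dict Int (List (List Int)) :=
  (PySem.List.enumerate L).foldl (fun d p => d.modify p.1 [] (fun v => v ++ [p.2])) d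

def pvKeyInts (m : Nat) : List Int := (List.range m).map (fun i : Nat => (i : Int))

lemma round_getD (L : List (List Int)) (d : PySem.Dict Int (List (List Int))) (t : Nat)
    (ht : t < L.length) : (pvRound L d).getD (t : Int) [] = d.getD (t : Int) [] ++ [L[t]] := by
  unfold pvRound
  rw [PySem.Dict.getD_foldl_modify_append]
  have := enum_filter_eq L 0 t ht
  simp only [zero_add] at this
  rw [this]

lemma round_keys (L : List (List Int)) (d : PySem.Dict Int (List (List Int))) :
    (pvRound L d).keys = PySem.Set.update d.keys (pvKeyInts L.length) := by
  unfold pvRound pvKeyInts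
  rw [PySem.Dict.keys_foldl_modify_key (PySem.List.enumerate L) Prod.fst []
    (fun _ p => fun v => v ++ [p.2]) d]
  rw [show (PySem.List.enumerate L).map Prod.fst = (List.range L.length).map (fun i : Nat => (i : Int)) by
    have := enum_map_fst L 0; simpa using this]

lemma set_update_of_subset {α : Type} [BEq α] [LawfulBEq α] (s : PySem.Set α) :
    ∀ ks : List α, (∀ k ∈ ks, k ∈ s) → PySem.Set.update s ks = s := by
  intro ks
  induction ks with
  | nil => intro _; rfl
  | cons k ks ih =>
    intro h
    show PySem.Set.update (PySem.Set.add s k) ks = s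
    rw [PySem.Set.add_of_mem (h k (by simp))]
    exact ih fun k' hk' => h k' (by simp [hk'])

lemma set_update_fresh {α : Type} [BEq α] [LawfulBEq α] :
    ∀ (ks : List α) (s : PySem.Set α), ks.Nodup → (∀ k ∈ ks, k ∉ s) →
    PySem.Set.update s ks = s ++ ks := by
  intro ks
  induction ks with
  | nil => intro s _ _; simp [PySem.Set.update]
  | cons k ks ih =>
    intro s hnd hdisj
    show PySem.Set.update (PySem.Set.add s k) ks = s ++ k :: ks
    have hadd : PySem.Set.add s k = s ++ [k] := by
      rw [PySem.Set.add, if_neg]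
      simp only [PySem.Set.contains]
      simpa using hdisj k (by simp)
    rw [hadd, ih (s ++ [k]) hnd.of_cons]
    · simp
    · intro k' hk'
      simp only [List.mem_append, List.mem_singleton]
      push_neg
      exact ⟨hdisj k' (by simp [hk']), fun h => (List.nodup_cons.mp hnd).1 (h ▸ hk')⟩

lemma keyInts_nodup (m : Nat) : (pvKeyInts m).Nodup := by
  unfold pvKeyInts
  refine List.Nodup.map ?_ List.nodup_range
  intro a b h
  exact Nat.cast_inj.mp (by simpa using h)

lemma rounds_getD (L : List (List Int)) (t : Nat) (ht : t < L.length) :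
    ∀ (rs : List Int) (d : PySem.Dict Int (List (List Int))),
    (rs.foldl (fun d _ => pvRound L d) d).getD (t : Int) []
      = d.getD (t : Int) [] ++ List.replicate rs.length L[t] := by
  intro rs
  induction rs with
  | nil => intro d; simp
  | cons r rs ih =>
    intro d
    simp only [List.foldl_cons, List.length_cons, ih (pvRound L d), round_getD L d t ht,
      List.replicate_succ]
    simp

lemma rounds_keys (L : List (List Int)) :
    ∀ (rs : List Int) (d : PySem.Dict Int (List (List Int))),
    d.keys = pvKeyInts L.length →
    (rs.foldl (fun d _ => pvRound L d) d).keys = pvKeyInts L.length := by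
  intro rs
  induction rs with
  | nil => intro d h; simpa using h
  | cons r rs ih =>
    intro d h
    refine ih (pvRound L d) ?_
    rw [round_keys, h, set_update_of_subset]
    intro k hk
    exact hk

lemma pyRange_zero_len (b : Int) (hb : 0 ≤ b) :
    (PySem.List.pyRange 0 b 1).length = b.toNat ∧
    PySem.List.pyRange 0 b 1 = (List.range b.toNat).map (fun i : Nat => (i : Int)) := by
  have h := PySem.List.pyRange_zero_natCast b.toNat
  rw [Int.toNat_of_nonneg hb] at h
  exact ⟨by rw [h]; simp, h⟩

lemma foldl_const {α β : Type} : ∀ (l : List α) (d : β), l.foldl (fun d _ => d) d = d := by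
  intro l
  induction l with
  | nil => intro d; rfl
  | cons x l ih => intro d; simpa using ih d

-- ===== VERDICT (by name: the statement is the Claim_ definition above) =====
theorem allocate_clients_to_threads_spec : Claim_equal_allocate_clients_to_threads := by
  intro nr nt nc _ hpre
  unfold Spec_allocate_clients_to_threads allocate_clients_to_threads allocate_clients_to_threads_alt
  by_cases hr : nr ≤ 0
  · rw [pyRange_nil_of_pos (a := 0) (b := nr) (s := 1) (by omega) (by omega), if_pos (Or.inl hr)]
    rfl
  by_cases hc : nc ≤ 0
  · rw [if_pos (Or.inr hc)]
    have hbody : (fun (mapping_dict : PySem.Dict Int (List (List Int))) (_round : Int) =>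
        let num_clients := nc
        let _client_list := PySem.List.pyRange 0 num_clients 1
        if num_clients > 0 then
          let idxs := (PySem.List.pyRange 0 nt 1).map (fun _ => ([] : List Int))
          let idxs := pyAWhile idxs num_clients 0 0 nt num_clients.toNat
          (PySem.List.enumerate idxs).foldl (fun d p => d.modify p.1 [] (fun v => v ++ [p.2])) mapping_dict
        else mapping_dict)
        = fun d _ => d := by
      funext d r
      simp only []
      rw [if_neg (by omega)]
    rw [hbody, foldl_const]
  -- main case
  have hnr : 0 < nr := by omega
  have hnc : 0 < nc := by omega
  have hnt : 1 ≤ nt := by rcases hpre with h | h | h <;> omega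
  rw [if_neg (by omega)]
  obtain ⟨hlen0, hrange0⟩ := pyRange_zero_len nt (by omega)
  rw [PySem.Dict.items_foldl_insert_fresh (PySem.List.pyRange 0 nt 1) (fun t => t)
    (fun t => List.replicate nr.toNat (PySem.List.pyRange t nc nt)) PySem.Dict.empty
    (fun a _ => rfl)
    (by rw [List.map_id', hrange0]; exact keyInts_nodup nt.toNat)]
  have hcast : ((nc.toNat : Nat) : Int) = nc := Int.toNat_of_nonneg hnc.le
  set idxs0 : List (List Int) := (PySem.List.pyRange 0 nt 1).map (fun _ => ([] : List Int)) with hidxs0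
  have hlen0' : idxs0.length = nt.toNat := by simp [hidxs0, hlen0]
  set L : List (List Int) := idxs0.mapIdx (fun t l =>
      l ++ PySem.List.pyRange (0 + PySem.Int.mod ((t : Int) - 0) nt) (0 + nc) nt) with hL
  have hwhile : pyAWhile idxs0 nc 0 0 nt nc.toNat = L := by
    have h := pyAWhile_spec nt hnt nc.toNat idxs0 0 0 hlen0' le_rfl (by omega)
    rw [hcast] at h
    exact h
  have hLlen : L.length = nt.toNat := by simp [hL, hlen0']
  have hLget : ∀ (t : Nat) (ht : t < L.length), L[t] = PySem.List.pyRange (t : Int) nc nt := by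
    intro t ht
    have ht0 : t < idxs0.length := by rw [hlen0']; rw [hLlen] at ht; exact ht
    simp only [hL, List.getElem_mapIdx]
    have hmod : PySem.Int.mod ((t : Int) - 0) nt = (t : Int) := by
      rw [sub_zero, PySem.Int.mod_eq_emod_of_pos (by omega)]
      exact Int.emod_eq_of_lt (by positivity) (by rw [hlen0'] at ht0; omega)
    rw [hmod]
    have : idxs0[t] = ([] : List Int) := by
      simp [hidxs0]
    rw [this]
    simp
  have hbody : (fun (mapping_dict : PySem.Dict Int (List (List Int))) (_round : Int) =>
      let num_clients := nc
      let _client_list := PySem.List.pyRange 0 num_clients 1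
      if num_clients > 0 then
        let idxs := (PySem.List.pyRange 0 nt 1).map (fun _ => ([] : List Int))
        let idxs := pyAWhile idxs num_clients 0 0 nt num_clients.toNat
        (PySem.List.enumerate idxs).foldl (fun d p => d.modify p.1 [] (fun v => v ++ [p.2])) mapping_dict
      else mapping_dict)
      = fun d _ => pvRound L d := by
    funext d r
    simp only []
    rw [if_pos (by omega)]
    rw [← hidxs0, hwhile]
    rfl
  rw [hbody]
  set rs : List Int := PySem.List.pyRange 0 nr 1 with hrs
  obtain ⟨hrslen, _⟩ := pyRange_zero_len nr (by omega)
  have hkeys0 : (pvRound L (PySem.Dict.empty : PySem.Dict Int (List (List Int)))).keys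
      = pvKeyInts L.length := by
    rw [round_keys]
    have : (PySem.Dict.empty : PySem.Dict Int (List (List Int))).keys = [] := rfl
    rw [this]
    have := set_update_fresh (pvKeyInts L.length) ([] : PySem.Set Int) (keyInts_nodup _)
      (by intro k _; simp)
    simpa using this
  obtain ⟨r0, rs', hrseq⟩ : ∃ r0 rs', rs = r0 :: rs' := by
    rcases rs with _ | ⟨r0, rs'⟩
    · exfalso; rw [← hrs] at hrslen; simp at hrslen; omega
    · exact ⟨r0, rs', rfl⟩
  set dFin : PySem.Dict Int (List (List Int)) :=
    rs.foldl (fun d _ => pvRound L d) PySem.Dict.empty with hdFin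
  have hkeys : dFin.keys = pvKeyInts L.length := by
    rw [hdFin, hrseq, List.foldl_cons]
    exact rounds_keys L rs' _ hkeys0
  have hgetD : ∀ (t : Nat) (ht : t < L.length),
      dFin.getD (t : Int) [] = List.replicate nr.toNat L[t] := by
    intro t ht
    rw [hdFin, rounds_getD L t ht rs PySem.Dict.empty]
    have : (PySem.Dict.empty : PySem.Dict Int (List (List Int))).getD (t : Int) [] = [] := rfl
    rw [this, hrslen]
    simp
  have hitems := PySem.Dict.items_eq_map_keys dFin (by rw [hkeys]; exact keyInts_nodup _) []
  rw [hitems, hkeys]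
  unfold pvKeyInts
  rw [hLlen, hrange0, List.map_map, List.map_map]
  apply List.map_congr_left
  intro i hi
  have hi' : i < L.length := by rw [hLlen]; simpa using hi
  simp only [Function.comp]
  rw [hgetD i hi', hLget i hi']
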